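-- pv_equiv track=rewrite | github.com/xboxlivejohns/.github.io | tools/freeze_site.py | split_filters
-- ===== SOURCE A (Python) =====
-- def split_filters(expr):
--     parts = []
--     current = []
--     in_quote = False
--     quote_char = ""
--     i = 0
--     while i < len(expr):
--         ch = expr[i]
--         if ch in {'"', "'"}:
--             if in_quote and ch == quote_char:
--                 in_quote = False
--                 quote_char = ""
--             elif not in_quote:
--                 in_quote = True
--                 quote_char = ch
--             current.append(ch)
--         elif ch == '|' and not in_quote:
--             parts.append(''.join(current).strip())
--             current = []
--         else:
--             current.append(ch)
--         i += 1
--     if current: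
--         parts.append(''.join(current).strip())
--     return parts
-- ===== SOURCE B (Python) =====
-- def split_filters(expr):
--     # One pass records the indices of top-level '|' (quote-toggle as in the spec);
--     # parts are then built by slicing between consecutive boundaries.
--     pipes = []
--     in_quote = False
--     quote_char = ""
--     for i, ch in enumerate(expr):
--         if ch in {'"', "'"}:
--             if in_quote and ch == quote_char:
--                 in_quote = False
--                 quote_char = ""
--             elif not in_quote:
--                 in_quote = True
--                 quote_char = ch
--         elif ch == '|' and not in_quote:
--             pipes.append(i)
--     starts = [0] + [p + 1 for p in pipes]
--     ends = pipes + [len(expr)]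
--     parts = [expr[s:e].strip() for s, e in zip(starts, ends)]
--     if starts[-1] == len(expr):  # final raw segment is empty: it is not emitted
--         parts.pop()
--     return parts
-- ===== Notes on version B (the rewrite author's own statement) =====
-- stated objective: faster
-- what changed: B replaces A's character-accumulator scan (which appends every character to a growing list and joins it per part) with a pass that only records the indices of top-level pipes, then builds the parts directly by slicing the string between consecutive boundary positions.
import Mathlib
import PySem

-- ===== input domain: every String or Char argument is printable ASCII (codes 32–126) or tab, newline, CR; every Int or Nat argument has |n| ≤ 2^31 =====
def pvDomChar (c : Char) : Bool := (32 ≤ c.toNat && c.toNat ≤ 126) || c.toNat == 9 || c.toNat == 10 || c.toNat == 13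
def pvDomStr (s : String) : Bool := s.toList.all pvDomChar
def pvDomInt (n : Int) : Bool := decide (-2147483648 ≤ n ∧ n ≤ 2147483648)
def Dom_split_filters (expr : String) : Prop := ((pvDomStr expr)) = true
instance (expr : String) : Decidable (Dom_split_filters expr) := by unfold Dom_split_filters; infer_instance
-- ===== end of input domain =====

-- B records the indices of top-level pipes in one pass and then slices the string
-- between consecutive boundaries, instead of A's character accumulator (objective: alternative).

-- ===== PORT A =====
-- ''.join(current).strip()
def pvAStrip (current : List Char) : String := PySem.Str.strip (String.mk current)

-- A's while loop; Python's quote_char "" is ported as `none`, a quote character as `some c`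
def pvALoop : List Char → List Char → Bool → Option Char → List String
  | [], current, _inq, _qc => if current ≠ [] then [pvAStrip current] else []
  | ch :: rest, current, inq, qc =>
    if ch = '"' ∨ ch = '\'' then
      if inq = true ∧ qc = some ch then pvALoop rest (current ++ [ch]) false none
      else if inq = false then pvALoop rest (current ++ [ch]) true (some ch)
      else pvALoop rest (current ++ [ch]) inq qc
    else if ch = '|' ∧ inq = false then
      pvAStrip current :: pvALoop rest [] inq qc
    else pvALoop rest (current ++ [ch]) inq qc

def split_filters (expr : String) : List String :=
  pvALoop expr.toList [] false none

-- ===== PORT B =====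
-- the enumerate loop of Source B: indices of '|' outside quotes (same quote-toggle state)
def pvBPipes : List Char → Nat → Bool → Option Char → List Nat
  | [], _i, _inq, _qc => []
  | ch :: rest, i, inq, qc =>
    if ch = '"' ∨ ch = '\'' then
      if inq = true ∧ qc = some ch then pvBPipes rest (i+1) false none
      else if inq = false then pvBPipes rest (i+1) true (some ch)
      else pvBPipes rest (i+1) inq qc
    else if ch = '|' ∧ inq = false then i :: pvBPipes rest (i+1) inq qc
    else pvBPipes rest (i+1) inq qc

-- expr[s:e].strip() with 0 ≤ s ≤ e natural (exact: PySem.List.slice_natCast)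
def pvBSlicePart (cs : List Char) (se : Nat × Nat) : String :=
  PySem.Str.strip (String.mk ((cs.drop se.1).take (se.2 - se.1)))

def split_filters_alt (expr : String) : List String :=
  let cs := expr.toList
  let pipes := pvBPipes cs 0 false none
  let starts := 0 :: pipes.map (· + 1)
  let ends := pipes ++ [cs.length]
  let parts := (starts.zip ends).map (pvBSlicePart cs)
  -- starts[-1]: starts is nonempty by construction, so getLastD's default is never used
  if starts.getLastD 0 = cs.length then parts.dropLast else parts

-- ===== PRECONDITION & SPEC =====
def Spec_split_filters (expr : String) (out : List String) : Prop := out = split_filters_alt expr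
instance (expr : String) (out : List String) : Decidable (Spec_split_filters expr out) := by unfold Spec_split_filters; infer_instance

-- ===== CLAIM (what is proved, stated in full; the proofs are below) =====
def Claim_equal_split_filters : Prop := ∀ (expr : String), Dom_split_filters expr → Spec_split_filters expr (split_filters expr)

-- ===== LEMMAS AND PROOFS =====

-- the raw (unstripped) segments of cs between top-level pipes, trailing segment included
def pvSegs : List Char → Bool → Option Char → List (List Char)
  | [], _, _ => [[]]
  | ch :: rest, inq, qc =>
    if ch = '"' ∨ ch = '\'' then
      if inq = true ∧ qc = some ch then (pvSegs rest false none).modifyHead (ch :: ·)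
      else if inq = false then (pvSegs rest true (some ch)).modifyHead (ch :: ·)
      else (pvSegs rest inq qc).modifyHead (ch :: ·)
    else if ch = '|' ∧ inq = false then [] :: pvSegs rest inq qc
    else (pvSegs rest inq qc).modifyHead (ch :: ·)

-- strip every segment, but drop the trailing one when it is empty
def pvFinish : List (List Char) → List String
  | [] => []
  | [l] => if l ≠ [] then [pvAStrip l] else []
  | l :: l' :: t => pvAStrip l :: pvFinish (l' :: t)

theorem pv_modifyHead_modifyHead {α : Type} (f g : α → α) (l : List α) :
    (l.modifyHead g).modifyHead f = l.modifyHead (fun x => f (g x)) := by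
  cases l <;> simp

theorem pvSegs_ne_nil : ∀ (cs : List Char) (inq : Bool) (qc : Option Char),
    pvSegs cs inq qc ≠ [] := by
  intro cs
  induction cs with
  | nil => intro inq qc; simp [pvSegs]
  | cons ch rest ih =>
    intro inq qc
    simp only [pvSegs]
    split_ifs <;> first | (simp; exact ih _ _) | simp

theorem pvFinish_cons (a : List Char) (ss : List (List Char)) (h : ss ≠ []) :
    pvFinish (a :: ss) = pvAStrip a :: pvFinish ss := by
  cases ss with
  | nil => exact absurd rfl h
  | cons b t => rfl

theorem pvALoop_eq (cs : List Char) : ∀ (current : List Char) (inq : Bool) (qc : Option Char),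
    pvALoop cs current inq qc = pvFinish ((pvSegs cs inq qc).modifyHead (current ++ ·)) := by
  induction cs with
  | nil =>
    intro current inq qc
    simp [pvALoop, pvSegs, pvFinish, List.modifyHead]
  | cons ch rest ih =>
    intro current inq qc
    simp only [pvALoop, pvSegs]
    have step : ∀ (inq' : Bool) (qc' : Option Char),
        pvALoop rest (current ++ [ch]) inq' qc' =
          pvFinish (((pvSegs rest inq' qc').modifyHead (ch :: ·)).modifyHead (current ++ ·)) := by
      intro inq' qc'
      rw [ih, pv_modifyHead_modifyHead]
      rw [show (fun x : List Char => current ++ [ch] ++ x) = (fun x => current ++ ch :: x) from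
        funext fun x => by simp]
    split_ifs with h1 h2 h3 h4
    · exact step false none
    · exact step true (some ch)
    · exact step inq qc
    · -- pipe outside quote
      rw [ih]
      have hne := pvSegs_ne_nil rest inq qc
      have : (pvSegs rest inq qc).modifyHead ([] ++ ·) = pvSegs rest inq qc := by
        cases pvSegs rest inq qc <;> simp
      rw [this]
      have : (([] : List Char) :: pvSegs rest inq qc).modifyHead (current ++ ·)
          = current :: pvSegs rest inq qc := by simp
      rw [this, pvFinish_cons _ _ hne]
    · exact step inq qc

-- raw segments as B computes them: slices between consecutive boundaries
def pvRaw (cs : List Char) (p : List Nat) : List (List Char) :=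
  ((0 :: p.map (· + 1)).zip (p ++ [cs.length])).map (fun se => (cs.drop se.1).take (se.2 - se.1))

theorem pvBPipes_shift : ∀ (cs : List Char) (i : Nat) (inq : Bool) (qc : Option Char),
    pvBPipes cs (i + 1) inq qc = (pvBPipes cs i inq qc).map (· + 1) := by
  intro cs
  induction cs with
  | nil => intro i inq qc; simp [pvBPipes]
  | cons ch rest ih =>
    intro i inq qc
    simp only [pvBPipes]
    split_ifs <;> simp [ih]

theorem pvShiftParts (ch : Char) (rest : List Char) :
    ∀ (a b : List Nat),
    ((a.map (· + 1)).zip (b.map (· + 1))).map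
        (fun se => ((ch :: rest).drop se.1).take (se.2 - se.1))
      = (a.zip b).map (fun se => (rest.drop se.1).take (se.2 - se.1)) := by
  intro a
  induction a with
  | nil => intro b; simp
  | cons x xs ih =>
    intro b
    cases b with
    | nil => simp
    | cons y ys =>
      simp only [List.map_cons, List.zip_cons_cons, List.map_cons, List.drop_succ_cons,
        Nat.succ_sub_succ]
      rw [ih ys]

theorem pvRaw_cons_shift (ch : Char) (rest : List Char) (p : List Nat) :
    pvRaw (ch :: rest) (p.map (· + 1)) = (pvRaw rest p).modifyHead (ch :: ·) := by
  cases p with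
  | nil => simp [pvRaw]
  | cons x xs =>
    have hmap : xs.map (· + 1) ++ [rest.length + 1] = (xs ++ [rest.length]).map (· + 1) := by
      simp
    have h2 : ((x + 1 + 1) :: (xs.map (· + 1)).map (· + 1) : List Nat)
        = ((x + 1) :: xs.map (· + 1)).map (· + 1) := by simp
    simp only [pvRaw, List.map_cons, List.length_cons, List.cons_append, List.zip_cons_cons,
      List.map_cons, List.drop_zero, Nat.sub_zero, List.take_succ_cons, List.modifyHead_cons]
    rw [hmap, h2, pvShiftParts]

theorem pvRaw_cons_pipe (ch : Char) (rest : List Char) (p : List Nat) :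
    pvRaw (ch :: rest) (0 :: p.map (· + 1)) = [] :: pvRaw rest p := by
  have h1 : (1 :: ((p.map (· + 1)).map (· + 1)) : List Nat) = (0 :: p.map (· + 1)).map (· + 1) := by
    simp
  have hmap : p.map (· + 1) ++ [rest.length + 1] = (p ++ [rest.length]).map (· + 1) := by
    simp
  simp only [pvRaw, List.map_cons, List.length_cons, List.cons_append, List.zip_cons_cons,
    List.map_cons, List.drop_zero, Nat.sub_zero, List.take_zero]
  rw [h1, hmap, pvShiftParts]

theorem pvRaw_eq_segs : ∀ (cs : List Char) (inq : Bool) (qc : Option Char),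
    pvRaw cs (pvBPipes cs 0 inq qc) = pvSegs cs inq qc := by
  intro cs
  induction cs with
  | nil => intro inq qc; simp [pvRaw, pvBPipes, pvSegs]
  | cons ch rest ih =>
    intro inq qc
    simp only [pvBPipes, pvSegs]
    split_ifs
    · rw [pvBPipes_shift, pvRaw_cons_shift, ih]
    · rw [pvBPipes_shift, pvRaw_cons_shift, ih]
    · rw [pvBPipes_shift, pvRaw_cons_shift, ih]
    · rw [pvBPipes_shift, pvRaw_cons_pipe, ih]
    · rw [pvBPipes_shift, pvRaw_cons_shift, ih]

theorem pvZipLast (len : Nat) : ∀ (p : List Nat) (s : Nat),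
    ((s :: p.map (· + 1)).zip (p ++ [len])).getLast?
      = some (((p.map (· + 1)).getLast?).getD s, len) := by
  intro p
  induction p with
  | nil => intro s; simp
  | cons x xs ih =>
    intro s
    simp only [List.map_cons, List.cons_append, List.zip_cons_cons]
    rw [List.getLast?_cons, ih (x + 1)]
    simp [List.getLast?_cons]

theorem pvBPipes_lt : ∀ (cs : List Char) (i : Nat) (inq : Bool) (qc : Option Char),
    ∀ x ∈ pvBPipes cs i inq qc, x < i + cs.length := by
  intro cs
  induction cs with
  | nil => intro i inq qc x hx; simp [pvBPipes] at hx
  | cons ch rest ih =>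
    intro i inq qc x hx
    simp only [pvBPipes] at hx
    split_ifs at hx
    · have := ih (i + 1) false none x hx; simp only [List.length_cons]; omega
    · have := ih (i + 1) true (some ch) x hx; simp only [List.length_cons]; omega
    · have := ih (i + 1) _ _ x hx; simp only [List.length_cons]; omega
    · rcases List.mem_cons.mp hx with rfl | hx'
      · simp only [List.length_cons]; omega
      · have := ih (i + 1) _ _ x hx'; simp only [List.length_cons]; omega
    · have := ih (i + 1) _ _ x hx; simp only [List.length_cons]; omega

theorem pvLastStart_le (n : Nat) : ∀ (p : List Nat) (s : Nat),
    (∀ x ∈ p, x < n) → s ≤ n → ((p.map (· + 1)).getLast?).getD s ≤ n := by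
  intro p
  induction p with
  | nil => intro s _ hs; simpa
  | cons x xs ih =>
    intro s h _
    simp only [List.map_cons]
    rw [List.getLast?_cons]
    simp only [Option.getD_some]
    exact ih (x + 1) (fun y hy => h y (List.mem_cons_of_mem _ hy)) (h x List.mem_cons_self)

theorem pvFinish_char : ∀ (ss : List (List Char)) (l : List Char), ss.getLast? = some l →
    pvFinish ss = if l = [] then (ss.map pvAStrip).dropLast else ss.map pvAStrip := by
  intro ss
  induction ss with
  | nil => intro l h; simp at h
  | cons a t ih =>
    intro l h
    cases t with
    | nil =>
      simp only [List.getLast?_singleton, Option.some.injEq] at h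
      subst h
      by_cases hl : a = [] <;> simp [pvFinish, hl]
    | cons b t' =>
      have h' : (b :: t').getLast? = some l := by
        rwa [List.getLast?_cons_cons] at h
      rw [pvFinish_cons a _ (by simp), ih l h']
      by_cases hl : l = [] <;> simp [hl]

theorem split_filters_alt_eq (expr : String) :
    split_filters_alt expr = pvFinish (pvSegs expr.toList false none) := by
  unfold split_filters_alt
  dsimp only
  set cs := expr.toList with hcs
  set p := pvBPipes cs 0 false none with hp
  set s₀ := ((p.map (· + 1)).getLast?).getD 0 with hs₀
  have hparts : ((0 :: p.map (· + 1)).zip (p ++ [cs.length])).map (pvBSlicePart cs)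
      = (pvSegs cs false none).map pvAStrip := by
    have h1 : ((0 :: p.map (· + 1)).zip (p ++ [cs.length])).map (pvBSlicePart cs)
        = (pvRaw cs p).map pvAStrip := by
      simp only [pvRaw, List.map_map]
      rfl
    rw [h1, hp, pvRaw_eq_segs]
  have hlast : (pvSegs cs false none).getLast? = some (cs.drop s₀) := by
    rw [← pvRaw_eq_segs cs false none, ← hp]
    unfold pvRaw
    rw [List.getLast?_map, pvZipLast]
    simp only [Option.map_some, Option.some.injEq, ← hs₀]
    exact List.take_of_length_le (by simp)
  have hs₀le : s₀ ≤ cs.length := by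
    rw [hs₀]
    exact pvLastStart_le cs.length p 0
      (fun x hx => by have := pvBPipes_lt cs 0 false none x hx; omega) (Nat.zero_le _)
  have hcond : (0 :: p.map (· + 1)).getLastD 0 = s₀ := by
    rw [List.getLastD_cons, List.getLastD_eq_getLast?]
  rw [hcond, hparts, pvFinish_char _ _ hlast]
  by_cases hc : s₀ = cs.length
  · simp [hc]
  · have hne : cs.drop s₀ ≠ [] := by
      rw [ne_eq, List.drop_eq_nil_iff]
      omega
    simp [hc, hne]

-- ===== VERDICT (by name: the statement is the Claim_ definition above) =====
theorem split_filters_spec : Claim_equal_split_filters := by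
  unfold Claim_equal_split_filters Spec_split_filters
  intro expr _
  show pvALoop expr.toList [] false none = _
  rw [pvALoop_eq]
  have hid : (pvSegs expr.toList false none).modifyHead (([] : List Char) ++ ·)
      = pvSegs expr.toList false none := by
    cases pvSegs expr.toList false none <;> simp
  rw [hid, split_filters_alt_eq]
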